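-- pv_equiv track=rewrite | github.com/Onic1234/PrakASD2025 | Module_4/Question/3.py | cariMahasiswaUangSakuTerkecil
-- ===== SOURCE A (Python) =====
-- def cariMahasiswaUangSakuTerkecil(daftar):
--     """
--     Mencari mahasiswa dengan uang saku terkecil dari daftar mahasiswa.
--     Jika ada lebih dari satu mahasiswa dengan uang saku terkecil, semua dikembalikan.
--     """
--     if not daftar:  # Jika daftar kosong
--         return []
--
--     # Cari uang saku terkecil
--     terkecil = daftar[0][2]
--     for mahasiswa in daftar:
--         if mahasiswa[2] < terkecil:
--             terkecil = mahasiswa[2]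
--
--     # Cari semua mahasiswa dengan uang saku terkecil
--     hasil = [mahasiswa for mahasiswa in daftar if mahasiswa[2] == terkecil]
--     return hasil
-- ===== SOURCE B (Python) =====
-- def cariMahasiswaUangSakuTerkecil(daftar):
--     """Single pass: maintain the running minimum and the tie list together."""
--     if not daftar:
--         return []
--     terkecil = daftar[0][2]
--     hasil = [daftar[0]]
--     for mahasiswa in daftar[1:]:
--         if mahasiswa[2] < terkecil:
--             terkecil = mahasiswa[2]
--             hasil = [mahasiswa]
--         elif mahasiswa[2] == terkecil:
--             hasil.append(mahasiswa)
--     return hasil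
-- ===== Notes on version B (the rewrite author's own statement) =====
-- stated objective: alternative
-- what changed: Replaces A's two passes (a min-finding loop followed by a filtering comprehension) with one traversal that maintains the running minimum and the tie list together, resetting the list on a new strict minimum and appending on ties.
import Mathlib
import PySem

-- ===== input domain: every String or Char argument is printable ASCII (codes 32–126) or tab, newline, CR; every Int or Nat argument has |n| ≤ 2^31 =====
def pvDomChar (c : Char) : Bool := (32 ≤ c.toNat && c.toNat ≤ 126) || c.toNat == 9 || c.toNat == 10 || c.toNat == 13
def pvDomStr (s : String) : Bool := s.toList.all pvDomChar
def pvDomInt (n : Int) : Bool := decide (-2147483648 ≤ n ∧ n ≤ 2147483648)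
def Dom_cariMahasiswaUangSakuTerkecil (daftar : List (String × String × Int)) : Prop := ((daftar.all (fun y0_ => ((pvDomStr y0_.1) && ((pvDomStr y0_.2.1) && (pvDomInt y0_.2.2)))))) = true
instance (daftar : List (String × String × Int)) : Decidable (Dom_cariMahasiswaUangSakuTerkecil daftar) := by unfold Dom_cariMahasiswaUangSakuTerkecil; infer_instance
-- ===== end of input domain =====

-- B replaces A's two passes (min loop, then filter) with one traversal that keeps
-- the running minimum and the tie list together (alternative decomposition, same cost).


-- ===== PORT A =====
-- Pass 1: minimum-finding loop; Pass 2: filter by equality with the minimum.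
def cariMahasiswaUangSakuTerkecil (daftar : List (String × String × Int)) : List (String × String × Int) :=
  match daftar with
  | [] => []
  | d0 :: _ =>
    let terkecil := daftar.foldl (fun t m => if m.2.2 < t then m.2.2 else t) d0.2.2
    daftar.filter (fun m => m.2.2 = terkecil)

-- ===== PORT B =====
-- One pass: state (terkecil, hasil); strict new minimum resets hasil, a tie appends.
def cariMahasiswaUangSakuTerkecil_alt (daftar : List (String × String × Int)) : List (String × String × Int) :=
  match daftar with
  | [] => []
  | d0 :: rest =>
    (rest.foldl
      (fun (s : Int × List (String × String × Int)) m =>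
        if m.2.2 < s.1 then (m.2.2, [m])
        else if m.2.2 = s.1 then (s.1, s.2 ++ [m])
        else s)
      (d0.2.2, [d0])).2

-- ===== PRECONDITION & SPEC =====
def Spec_cariMahasiswaUangSakuTerkecil (daftar : List (String × String × Int)) (out : List (String × String × Int)) : Prop := out = cariMahasiswaUangSakuTerkecil_alt daftar
instance (daftar : List (String × String × Int)) (out : List (String × String × Int)) : Decidable (Spec_cariMahasiswaUangSakuTerkecil daftar out) := by unfold Spec_cariMahasiswaUangSakuTerkecil; infer_instance

-- ===== CLAIM (what is proved, stated in full; the proofs are below) =====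
def Claim_equal_cariMahasiswaUangSakuTerkecil : Prop := ∀ (daftar : List (String × String × Int)), Dom_cariMahasiswaUangSakuTerkecil daftar → Spec_cariMahasiswaUangSakuTerkecil daftar (cariMahasiswaUangSakuTerkecil daftar)

-- ===== LEMMAS AND PROOFS =====

-- A's minimum-finding fold, from a general seed.
def pvMinA (t : Int) (l : List (String × String × Int)) : Int :=
  l.foldl (fun t m => if m.2.2 < t then m.2.2 else t) t

-- B's one-pass fold, from a general state.
def pvStepB (s : Int × List (String × String × Int)) (m : String × String × Int) :
    Int × List (String × String × Int) :=
  if m.2.2 < s.1 then (m.2.2, [m])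
  else if m.2.2 = s.1 then (s.1, s.2 ++ [m])
  else s

lemma pvMinA_le (l : List (String × String × Int)) : ∀ t : Int, pvMinA t l ≤ t := by
  induction l with
  | nil => intro t; simp [pvMinA]
  | cons m l ih =>
    intro t
    simp only [pvMinA, List.foldl_cons]
    split_ifs with h
    · exact le_trans (ih m.2.2) (le_of_lt h)
    · exact ih t

-- Invariant of B's fold: its result is A's filter, prefixed by the carried list
-- when the seed survives as the minimum.
lemma pvMinA_cons (m : String × String × Int) (l : List (String × String × Int)) (t : Int) :
    pvMinA t (m :: l) = if m.2.2 < t then pvMinA m.2.2 l else pvMinA t l := by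
  simp only [pvMinA, List.foldl_cons]
  split_ifs <;> rfl

-- Invariant of B's fold: its result is A's filter, prefixed by the carried list
-- when the seed survives as the minimum.
lemma pvFoldB_eq (l : List (String × String × Int)) :
    ∀ (t : Int) (h : List (String × String × Int)),
      (l.foldl pvStepB (t, h)).2 =
        (if pvMinA t l < t then [] else h) ++ l.filter (fun m => m.2.2 = pvMinA t l) := by
  induction l with
  | nil => intro t h; simp [pvMinA]
  | cons m l ih =>
    intro t h
    rw [List.foldl_cons, pvMinA_cons, List.filter_cons]
    rcases lt_trichotomy m.2.2 t with hlt | heq | hgt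
    · -- new strict minimum: reset
      have hstep : pvStepB (t, h) m = (m.2.2, [m]) := by simp [pvStepB, hlt]
      have hle := pvMinA_le l m.2.2
      rw [hstep, ih m.2.2 [m], if_pos hlt, if_pos (lt_of_le_of_lt hle hlt)]
      rcases eq_or_lt_of_le hle with heq2 | hlt2
      · simp [heq2]
      · simp [hlt2, (ne_of_lt hlt2).symm]
    · -- tie with the current minimum: append
      have hnl : ¬ m.2.2 < t := by simp [heq]
      have hstep : pvStepB (t, h) m = (t, h ++ [m]) := by simp [pvStepB, heq]
      have hle := pvMinA_le l t
      rw [hstep, ih t (h ++ [m]), if_neg hnl]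
      rcases eq_or_lt_of_le hle with heq2 | hlt2
      · simp [heq2, heq]
      · have hne : ¬ m.2.2 = pvMinA t l := by rw [heq]; exact (ne_of_lt hlt2).symm
        simp [hlt2, hne]
    · -- larger: skip
      have hstep : pvStepB (t, h) m = (t, h) := by
        simp [pvStepB, not_lt.mpr (le_of_lt hgt), (ne_of_gt hgt)]
      have hle := pvMinA_le l t
      have hne : ¬ m.2.2 = pvMinA t l := by
        intro he; exact absurd (he ▸ lt_of_le_of_lt hle hgt) (lt_irrefl _)
      rw [hstep, ih t h, if_neg (not_lt.mpr (le_of_lt hgt))]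
      simp [hne]

-- ===== VERDICT (by name: the statement is the Claim_ definition above) =====
theorem cariMahasiswaUangSakuTerkecil_spec : Claim_equal_cariMahasiswaUangSakuTerkecil := by
  intro daftar _
  unfold Spec_cariMahasiswaUangSakuTerkecil cariMahasiswaUangSakuTerkecil cariMahasiswaUangSakuTerkecil_alt
  match daftar with
  | [] => rfl
  | d0 :: rest =>
    simp only
    have hB := pvFoldB_eq rest d0.2.2 [d0]
    rw [show (List.foldl
          (fun (s : Int × List (String × String × Int)) m =>
            if m.2.2 < s.1 then (m.2.2, [m])
            else if m.2.2 = s.1 then (s.1, s.2 ++ [m]) else s)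
          (d0.2.2, [d0]) rest)
        = List.foldl pvStepB (d0.2.2, [d0]) rest from rfl, hB]
    have hseed : (List.foldl (fun t m => if m.2.2 < t then m.2.2 else t) d0.2.2 (d0 :: rest))
        = pvMinA d0.2.2 rest := by
      simp [pvMinA, List.foldl_cons]
    rw [hseed, List.filter_cons]
    have hle := pvMinA_le rest d0.2.2
    rcases eq_or_lt_of_le hle with heq | hlt
    · simp [heq]
    · simp [hlt, (ne_of_lt hlt).symm]
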